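-- pv_equiv track=rewrite | github.com/likes2addfunctions/CodeSamples | dutyAssigner.py | segmentStaffPoolByNumOfAssignments
-- ===== SOURCE A (Python) =====
-- def segmentStaffPoolByNumOfAssignments(staffPool, assignmentCounts, maxAssignments):
--     segments = []
--     for i in range(maxAssignments):
--         segment = []
--         for member in staffPool:
--             if member in assignmentCounts:
--                 if assignmentCounts[member] == i:
--                     segment.append(member)
--                 else:
--                     pass
--             elif i == 0:
--                 segment.append(member)
--         segments.append(segment)
--     return segments
-- ===== SOURCE B (Python) =====
-- def segmentStaffPoolByNumOfAssignments(staffPool, assignmentCounts, maxAssignments):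
--     n = maxAssignments if maxAssignments > 0 else 0
--     buckets = [[] for _ in range(n)]
--     for member in staffPool:
--         c = assignmentCounts.get(member, 0)
--         if 0 <= c < n:
--             buckets[c].append(member)
--     return buckets
-- ===== Notes on version B (the rewrite author's own statement) =====
-- stated objective: faster
-- what changed: Instead of scanning the whole staff pool once per assignment level (maxAssignments nested passes), B preallocates the segment lists and places each member into its bucket in a single pass using the member's count as the index.
import Mathlib
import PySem

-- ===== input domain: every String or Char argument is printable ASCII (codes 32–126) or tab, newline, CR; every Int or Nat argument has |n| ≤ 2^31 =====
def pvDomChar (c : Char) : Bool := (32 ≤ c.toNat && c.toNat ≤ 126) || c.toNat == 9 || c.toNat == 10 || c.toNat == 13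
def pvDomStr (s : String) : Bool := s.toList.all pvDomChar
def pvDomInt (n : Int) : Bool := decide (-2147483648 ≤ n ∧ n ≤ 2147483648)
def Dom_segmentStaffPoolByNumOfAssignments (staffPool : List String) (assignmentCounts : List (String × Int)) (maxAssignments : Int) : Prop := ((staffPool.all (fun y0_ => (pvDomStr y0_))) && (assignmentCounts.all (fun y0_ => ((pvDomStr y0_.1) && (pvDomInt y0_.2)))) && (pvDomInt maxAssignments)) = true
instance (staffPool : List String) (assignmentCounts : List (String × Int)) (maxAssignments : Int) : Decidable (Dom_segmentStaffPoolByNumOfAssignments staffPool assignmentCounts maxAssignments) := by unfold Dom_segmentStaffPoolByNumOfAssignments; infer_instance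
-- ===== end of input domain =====

-- B replaces A's pass over the staff pool per assignment level by one pass that drops
-- each member into a preallocated bucket indexed by its count (objective: faster).

-- ===== PORT A =====
def segmentStaffPoolByNumOfAssignments (staffPool : List String) (assignmentCounts : List (String × Int)) (maxAssignments : Int) : List (List String) :=
  let d := PySem.Dict.mk assignmentCounts
  (PySem.List.pyRange 0 maxAssignments 1).foldl
    (fun segments i =>
      segments ++ [staffPool.foldl
        (fun segment member =>
          if d.contains member then
            (if d.getD member 0 = i then segment ++ [member] else segment)
          else if i = 0 then segment ++ [member] else segment)
        []])
    []

-- ===== PORT B =====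
def segmentStaffPoolByNumOfAssignments_alt (staffPool : List String) (assignmentCounts : List (String × Int)) (maxAssignments : Int) : List (List String) :=
  let n : Nat := (if 0 < maxAssignments then maxAssignments else 0).toNat
  let d := PySem.Dict.mk assignmentCounts
  staffPool.foldl
    (fun buckets member =>
      let c := d.getD member 0
      if 0 ≤ c ∧ c < (n : Int) then
        buckets.set c.toNat (buckets.getD c.toNat [] ++ [member])
      else buckets)
    (List.replicate n [])

-- ===== PRECONDITION & SPEC =====
def Spec_segmentStaffPoolByNumOfAssignments (staffPool : List String) (assignmentCounts : List (String × Int)) (maxAssignments : Int) (out : List (List String)) : Prop := out = segmentStaffPoolByNumOfAssignments_alt staffPool assignmentCounts maxAssignments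
instance (staffPool : List String) (assignmentCounts : List (String × Int)) (maxAssignments : Int) (out : List (List String)) : Decidable (Spec_segmentStaffPoolByNumOfAssignments staffPool assignmentCounts maxAssignments out) := by unfold Spec_segmentStaffPoolByNumOfAssignments; infer_instance

-- ===== CLAIM (what is proved, stated in full; the proofs are below) =====
def Claim_equal_segmentStaffPoolByNumOfAssignments : Prop := ∀ (staffPool : List String) (assignmentCounts : List (String × Int)) (maxAssignments : Int), Dom_segmentStaffPoolByNumOfAssignments staffPool assignmentCounts maxAssignments → Spec_segmentStaffPoolByNumOfAssignments staffPool assignmentCounts maxAssignments (segmentStaffPoolByNumOfAssignments staffPool assignmentCounts maxAssignments)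

-- ===== LEMMAS AND PROOFS =====

-- both programs place member m at level i exactly when its count-with-default-0 is i
theorem segA_char (staffPool : List String) (assignmentCounts : List (String × Int)) (maxAssignments : Int) :
    segmentStaffPoolByNumOfAssignments staffPool assignmentCounts maxAssignments =
      (List.range maxAssignments.toNat).map
        (fun (k : Nat) => staffPool.filter
          (fun m => (PySem.Dict.mk assignmentCounts).getD m 0 = (k : Int))) := by
  unfold segmentStaffPoolByNumOfAssignments
  rw [PySem.List.pyRange_one, List.foldl_map, PySem.List.foldl_append_singleton_eq_map]
  simp only [List.nil_append, Int.sub_zero, Int.zero_add]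
  apply List.map_congr_left
  intro k _
  set d := PySem.Dict.mk assignmentCounts with hd
  have hstep : (fun (segment : List String) member =>
      if d.contains member then
        (if d.getD member 0 = (k : Int) then segment ++ [member] else segment)
      else if (k : Int) = 0 then segment ++ [member] else segment)
      = fun (segment : List String) member =>
        if d.getD member 0 = (k : Int) then segment ++ [member] else segment := by
    funext segment member
    by_cases hc : d.contains member
    · simp [hc]
    · have h0 : d.getD member 0 = 0 := by
        have := (PySem.Dict.get?_eq_none_iff_contains d member).mpr (by simpa using hc)
        simp [PySem.Dict.getD, this]
      simp [hc, h0, eq_comm]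
  rw [hstep, PySem.List.foldl_append_ite_eq_filter]
  simp

theorem segB_invariant (key : String → Int) (n : Nat) (xs : List String) :
    ∀ (B : List (List String)), B.length = n →
      xs.foldl
        (fun buckets member =>
          let c := key member
          if 0 ≤ c ∧ c < (n : Int) then
            buckets.set c.toNat (buckets.getD c.toNat [] ++ [member])
          else buckets) B =
      (List.range n).map
        (fun k => B.getD k [] ++ xs.filter (fun m => key m = (k : Int))) := by
  induction xs with
  | nil =>
    intro B hB
    simp only [List.foldl_nil, List.filter_nil, List.append_nil]
    apply List.ext_getElem
    · simp [hB]
    · intro i h1 h2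
      simp at h2
      simp [List.getD_eq_getElem?_getD, h2, hB]
  | cons x xs ih =>
    intro B hB
    simp only [List.foldl_cons]
    by_cases hc : 0 ≤ key x ∧ key x < (n : Int)
    · rw [if_pos hc]
      have hlen : (B.set (key x).toNat (B.getD (key x).toNat [] ++ [x])).length = n := by
        simp [hB]
      rw [ih _ hlen]
      apply List.map_congr_left
      intro k hk
      simp only [List.mem_range] at hk
      have hcn : (key x).toNat < n := by omega
      by_cases hkc : k = (key x).toNat
      · subst hkc
        have hkey : key x = ((key x).toNat : Int) := by omega
        rw [List.getD_eq_getElem?_getD, List.getElem?_set_self (by omega)]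
        simp only [Option.getD_some]
        rw [List.filter_cons_of_pos (by simp [← hkey])]
        rw [List.getD_eq_getElem?_getD]
        simp [List.append_assoc]
      · have hne : key x ≠ (k : Int) := by omega
        rw [List.getD_eq_getElem?_getD, List.getElem?_set_ne (by omega)]
        rw [List.filter_cons_of_neg (by simp [hne])]
        rw [List.getD_eq_getElem?_getD]
    · rw [if_neg hc]
      rw [ih _ hB]
      apply List.map_congr_left
      intro k hk
      simp only [List.mem_range] at hk
      have hne : key x ≠ (k : Int) := by omega
      rw [List.filter_cons_of_neg (by simp [hne])]

theorem segB_char (staffPool : List String) (assignmentCounts : List (String × Int)) (maxAssignments : Int) :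
    segmentStaffPoolByNumOfAssignments_alt staffPool assignmentCounts maxAssignments =
      (List.range maxAssignments.toNat).map
        (fun (k : Nat) => staffPool.filter
          (fun m => (PySem.Dict.mk assignmentCounts).getD m 0 = (k : Int))) := by
  unfold segmentStaffPoolByNumOfAssignments_alt
  have hn : (if 0 < maxAssignments then maxAssignments else 0).toNat = maxAssignments.toNat := by
    split <;> omega
  simp only [hn]
  rw [segB_invariant _ _ _ _ (by simp)]
  apply List.map_congr_left
  intro k hk
  simp only [List.mem_range] at hk
  rw [List.getD_eq_getElem?_getD]
  simp [hk]

-- ===== VERDICT (by name: the statement is the Claim_ definition above) =====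
theorem segmentStaffPoolByNumOfAssignments_spec : Claim_equal_segmentStaffPoolByNumOfAssignments := by
  intro staffPool assignmentCounts maxAssignments _
  unfold Spec_segmentStaffPoolByNumOfAssignments
  rw [segA_char, segB_char]
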